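-- pv_equiv track=rewrite | github.com/verpeutlab/SLEAPing-with-cockroaches | RoachAnalysis.py | count_boundary_crossings
-- ===== SOURCE A (Python) =====
-- def count_boundary_crossings(y_coordinates, boundary_positions):
--     crossings = [0] * len(boundary_positions)
--     previous_position = y_coordinates[0]
--
--     for position in y_coordinates[1:]:
--         for i, boundary_y in enumerate(boundary_positions):
--             if (previous_position < boundary_y and position >= boundary_y) or \
--                (previous_position > boundary_y and position <= boundary_y):
--                 crossings[i] += 1
--         previous_position = position
--
--     return crossings
-- ===== SOURCE B (Python) =====
-- def _bisect_left(a, x):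
--     lo, hi = 0, len(a)
--     while lo < hi:
--         mid = (lo + hi) // 2
--         if a[mid] < x:
--             lo = mid + 1
--         else:
--             hi = mid
--     return lo
--
--
-- def _bisect_right(a, x):
--     lo, hi = 0, len(a)
--     while lo < hi:
--         mid = (lo + hi) // 2
--         if x < a[mid]:
--             hi = mid
--         else:
--             lo = mid + 1
--     return lo
--
--
-- def count_boundary_crossings(y_coordinates, boundary_positions):
--     # Sort the boundaries once; each segment then contributes to one contiguous
--     # run of sorted boundaries, recorded in a difference array and resolved by
--     # a single prefix-sum pass, remapped back to the original order.
--     m = len(boundary_positions)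
--     order = sorted(range(m), key=lambda i: boundary_positions[i])
--     vals = [boundary_positions[i] for i in order]
--     diff = [0] * (m + 1)
--     prev = y_coordinates[0]
--     for pos in y_coordinates[1:]:
--         if prev < pos:
--             lo = _bisect_right(vals, prev)
--             hi = _bisect_right(vals, pos)
--         else:
--             lo = _bisect_left(vals, pos)
--             hi = _bisect_left(vals, prev)
--         diff[lo] += 1
--         diff[hi] -= 1
--         prev = pos
--     result = [0] * m
--     running = 0
--     for k in range(m):
--         running += diff[k]
--         result[order[k]] = running
--     return result
-- ===== Notes on version B (the rewrite author's own statement) =====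
-- stated objective: faster
-- what changed: Instead of testing every boundary against every segment, B sorts the boundaries once, locates each segment's crossed run of sorted boundaries by binary search, records it in a difference array, and recovers per-boundary counts with one prefix-sum pass remapped to the original order.
import Mathlib
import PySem

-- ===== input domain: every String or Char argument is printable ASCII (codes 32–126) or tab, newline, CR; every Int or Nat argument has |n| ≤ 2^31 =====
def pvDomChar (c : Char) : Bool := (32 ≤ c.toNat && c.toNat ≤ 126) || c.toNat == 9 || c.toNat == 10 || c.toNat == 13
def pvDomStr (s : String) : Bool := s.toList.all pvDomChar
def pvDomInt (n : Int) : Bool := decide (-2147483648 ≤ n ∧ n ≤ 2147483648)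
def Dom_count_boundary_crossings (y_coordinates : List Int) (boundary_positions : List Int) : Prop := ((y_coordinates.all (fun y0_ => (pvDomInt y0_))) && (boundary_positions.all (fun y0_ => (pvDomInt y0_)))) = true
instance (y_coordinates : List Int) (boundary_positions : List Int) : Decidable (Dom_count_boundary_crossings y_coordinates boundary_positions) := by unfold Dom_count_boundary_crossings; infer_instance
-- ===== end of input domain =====

-- B sorts the boundaries once, binary-searches each segment's crossed run, accumulates a
-- difference array and resolves it with one prefix-sum pass (remapped to original order),
-- replacing A's per-segment scan of every boundary.

-- ===== PORT A =====
-- inner 'for i, boundary_y in enumerate(boundary_positions)' plus 'previous_position = position'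
def bcStepA (bs : List Int) (st : List Int × Int) (pos : Int) : List Int × Int :=
  ((PySem.List.enumerate bs).foldl
    (fun cr ib =>
      if (st.2 < ib.2 ∧ ib.2 ≤ pos) ∨ (ib.2 < st.2 ∧ pos ≤ ib.2) then
        PySem.List.pySetD cr ib.1 (PySem.List.pyGetD cr ib.1 0 + 1)
      else cr) st.1, pos)

def count_boundary_crossings (y_coordinates : List Int) (boundary_positions : List Int) : List Int :=
  -- crossings = [0] * len(boundary_positions); previous_position = y_coordinates[0] (Pre_ excludes [])
  ((PySem.List.slice y_coordinates (some 1) none).foldl (bcStepA boundary_positions)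
    (List.replicate boundary_positions.length 0, PySem.List.pyGetD y_coordinates 0 0)).1

-- ===== PORT B =====
-- one loop iteration: locate the crossed run [lo, hi) of sorted boundaries, mark the difference array
-- (_bisect_left / _bisect_right of Source B are the standard binary-search loops = PySem.List.bisectLeft/bisectRight)
def bcStepDiff (vals : List Int) (st : List Int × Int) (pos : Int) : List Int × Int :=
  let lohi : Nat × Nat :=
    if st.2 < pos then (PySem.List.bisectRight vals st.2, PySem.List.bisectRight vals pos)
    else (PySem.List.bisectLeft vals pos, PySem.List.bisectLeft vals st.2)
  let d1 := PySem.List.pySetD st.1 (lohi.1 : Int) (PySem.List.pyGetD st.1 (lohi.1 : Int) 0 + 1)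
  (PySem.List.pySetD d1 (lohi.2 : Int) (PySem.List.pyGetD d1 (lohi.2 : Int) 0 - 1), pos)

-- one iteration of 'running += diff[k]; result[order[k]] = running'
def bcStepOut (diff order : List Int) (st : List Int × Int) (k : Int) : List Int × Int :=
  let running := st.2 + PySem.List.pyGetD diff k 0
  (PySem.List.pySetD st.1 (PySem.List.pyGetD order k 0) running, running)

def count_boundary_crossings_alt (y_coordinates : List Int) (boundary_positions : List Int) : List Int :=
  let m := boundary_positions.length
  -- order = sorted(range(m), key=lambda i: boundary_positions[i]); every i is in range
  let order := PySem.List.sorted (PySem.List.pyRange 0 (m : Int) 1)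
      (fun i => PySem.List.pyGetD boundary_positions i 0)
  let vals := order.map (fun i => PySem.List.pyGetD boundary_positions i 0)
  let diff := ((PySem.List.slice y_coordinates (some 1) none).foldl (bcStepDiff vals)
      (List.replicate (m+1) 0, PySem.List.pyGetD y_coordinates 0 0)).1
  ((PySem.List.pyRange 0 (m : Int) 1).foldl (bcStepOut diff order) (List.replicate m 0, 0)).1

-- ===== PRECONDITION & SPEC =====
-- Pre_ excludes the empty trajectory, on which A raises IndexError at y_coordinates[0].
def Pre_count_boundary_crossings (y_coordinates : List Int) (boundary_positions : List Int) : Prop :=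
  y_coordinates ≠ []
instance (y_coordinates : List Int) (boundary_positions : List Int) : Decidable (Pre_count_boundary_crossings y_coordinates boundary_positions) := by unfold Pre_count_boundary_crossings; infer_instance

def pvWitness_count_boundary_crossings : List Int × List Int := ([0, 3, -1], [1, 1, -2])

def Spec_count_boundary_crossings (y_coordinates : List Int) (boundary_positions : List Int) (out : List Int) : Prop := out = count_boundary_crossings_alt y_coordinates boundary_positions
instance (y_coordinates : List Int) (boundary_positions : List Int) (out : List Int) : Decidable (Spec_count_boundary_crossings y_coordinates boundary_positions out) := by unfold Spec_count_boundary_crossings; infer_instance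

-- ===== CLAIM (what is proved, stated in full; the proofs are below) =====
def Claim_equal_count_boundary_crossings : Prop := ∀ (y_coordinates : List Int) (boundary_positions : List Int), Dom_count_boundary_crossings y_coordinates boundary_positions → Pre_count_boundary_crossings y_coordinates boundary_positions → Spec_count_boundary_crossings y_coordinates boundary_positions (count_boundary_crossings y_coordinates boundary_positions)

-- ===== LEMMAS AND PROOFS =====

-- proof-only helpers: crossing predicate, consecutive pairs, per-boundary count
def bcCrossB (p q b : Int) : Bool := (decide (p < b) && decide (b ≤ q)) || (decide (b < p) && decide (q ≤ b))

def bcPairs : Int → List Int → List (Int × Int)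
  | _, [] => []
  | p, q :: t => (p, q) :: bcPairs q t

def bcCnt (p : Int) (t : List Int) (b : Int) : Nat :=
  List.countP (fun s => bcCrossB s.1 s.2 b) (bcPairs p t)

-- lo/hi of the sorted-boundary run crossed by a segment (matches bcStepDiff's lohi)
def bcL (vals : List Int) (p q : Int) : Nat :=
  if p < q then PySem.List.bisectRight vals p else PySem.List.bisectLeft vals q
def bcH (vals : List Int) (p q : Int) : Nat :=
  if p < q then PySem.List.bisectRight vals q else PySem.List.bisectLeft vals p

-- ---- A-side characterisation ----

lemma bc_zipWith_ext {f g : Int → Int → Int} (h : ∀ x y, f x y = g x y) :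
    ∀ (xs ys : List Int), List.zipWith f xs ys = List.zipWith g xs ys := by
  intro xs
  induction xs with
  | nil => intro ys; simp
  | cons x xs ih =>
    intro ys
    cases ys with
    | nil => simp
    | cons y ys => simp [h, ih]

lemma bc_zipWith_zipWith (g h : Int → Int → Int) :
    ∀ (xs ys : List Int), List.zipWith g (List.zipWith h xs ys) ys = List.zipWith (fun x y => g (h x y) y) xs ys := by
  intro xs
  induction xs with
  | nil => intro ys; simp
  | cons x xs ih =>
    intro ys
    cases ys with
    | nil => simp
    | cons y ys => simp [ih]

lemma bc_zipWith_add_zero : ∀ (xs ys : List Int), xs.length = ys.length →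
    List.zipWith (fun c _ => c + (0 : Int)) xs ys = xs := by
  intro xs
  induction xs with
  | nil => intro ys _; simp
  | cons x xs ih =>
    intro ys hl
    cases ys with
    | nil => simp at hl
    | cons y ys =>
      simp at hl
      simp only [List.zipWith_cons_cons, add_zero]
      have := ih ys hl
      simp only [add_zero] at this
      rw [this]

lemma bc_zipWith_replicate (g : Int → Int) :
    ∀ (bs : List Int), List.zipWith (fun c b => c + g b) (List.replicate bs.length (0 : Int)) bs = bs.map g := by
  intro bs
  induction bs with
  | nil => simp
  | cons b bs ih => simp [List.replicate_succ, ih]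

lemma bc_innerA (prev pos : Int) : ∀ (bs done rest : List Int), rest.length = bs.length →
    (PySem.List.enumerate bs (done.length : Int)).foldl
      (fun cr ib =>
        if (prev < ib.2 ∧ ib.2 ≤ pos) ∨ (ib.2 < prev ∧ pos ≤ ib.2) then
          PySem.List.pySetD cr ib.1 (PySem.List.pyGetD cr ib.1 0 + 1)
        else cr) (done ++ rest)
    = done ++ List.zipWith (fun c b => if bcCrossB prev pos b then c + 1 else c) rest bs := by
  intro bs
  induction bs with
  | nil =>
    intro done rest h
    cases rest with
    | nil => simp [PySem.List.enumerate_nil]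
    | cons r rest => simp at h
  | cons b bs ih =>
    intro done rest h
    cases rest with
    | nil => simp at h
    | cons r rest =>
      simp only [List.length_cons, List.length_cons, Nat.succ.injEq] at h
      rw [PySem.List.enumerate_cons]
      simp only [List.foldl_cons]
      have hget : PySem.List.pyGetD (done ++ r :: rest) ((done.length : Nat) : Int) 0 = r := by
        rw [PySem.List.pyGetD_natCast, List.getD_append_right done _ _ _ (Nat.le_refl _)]
        simp
      have hset : ∀ v : Int, PySem.List.pySetD (done ++ r :: rest) ((done.length : Nat) : Int) v
          = done ++ v :: rest := by
        intro v
        rw [PySem.List.pySetD_natCast, List.set_append_right _ _ (Nat.le_refl _)]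
        simp
      have hstep : (if (prev < b ∧ b ≤ pos) ∨ (b < prev ∧ pos ≤ b) then
            PySem.List.pySetD (done ++ r :: rest) ((done.length : Nat) : Int)
              (PySem.List.pyGetD (done ++ r :: rest) ((done.length : Nat) : Int) 0 + 1)
          else done ++ r :: rest)
          = done ++ (if bcCrossB prev pos b then r + 1 else r) :: rest := by
        by_cases hc : (prev < b ∧ b ≤ pos) ∨ (b < prev ∧ pos ≤ b)
        · have : bcCrossB prev pos b = true := by simp [bcCrossB]; tauto
          rw [if_pos hc, hget, hset, this, if_pos rfl]
        · have : bcCrossB prev pos b = false := by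
            simp only [bcCrossB]
            simp only [not_or, not_and] at hc
            rcases hc with ⟨h1, h2⟩
            by_cases hb1 : prev < b
            · simp [hb1, h1 hb1, h2]
              intro hlt; exact absurd hb1 (by omega)
            · by_cases hb2 : b < prev
              · simp [hb1, hb2, h2 hb2]
              · simp [hb1, hb2]
          rw [if_neg hc, this]
          simp
      rw [hstep]
      have harr : ((done.length : Nat) : Int) + 1 = (((done ++ [if bcCrossB prev pos b then r + 1 else r]).length : Nat) : Int) := by
        simp [List.length_append]
      have hre : done ++ (if bcCrossB prev pos b then r + 1 else r) :: rest
          = (done ++ [if bcCrossB prev pos b then r + 1 else r]) ++ rest := by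
        simp
      rw [harr, hre, ih _ rest h]
      simp [List.zipWith]

lemma bc_foldA : ∀ (t : List Int) (p : Int) (bs cr : List Int), cr.length = bs.length →
    (t.foldl (bcStepA bs) (cr, p)).1
      = List.zipWith (fun c b => c + (bcCnt p t b : Int)) cr bs := by
  intro t
  induction t with
  | nil =>
    intro p bs cr h
    simp only [List.foldl_nil, bcCnt, bcPairs, List.countP_nil, Nat.cast_zero]
    exact (bc_zipWith_add_zero cr bs h).symm
  | cons pos t ih =>
    intro p bs cr h
    simp only [List.foldl_cons]
    have hinner : bcStepA bs (cr, p) pos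
        = (List.zipWith (fun c b => if bcCrossB p pos b then c + 1 else c) cr bs, pos) := by
      unfold bcStepA
      have := bc_innerA p pos bs [] cr h
      simp only [List.nil_append, List.length_nil, Nat.cast_zero] at this
      rw [this]
    rw [hinner, ih pos bs _ (by simp [h]),
      bc_zipWith_zipWith (fun c b => c + (bcCnt pos t b : Int))
        (fun c b => if bcCrossB p pos b then c + 1 else c) cr bs]
    apply bc_zipWith_ext
    intro c b
    have hc : bcCnt p (pos :: t) b
        = bcCnt pos t b + (if bcCrossB p pos b then 1 else 0) := by
      simp [bcCnt, bcPairs, List.countP_cons]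
    rw [hc]
    push_cast
    split_ifs <;> ring

lemma bc_A_char (y : Int) (t bs : List Int) :
    count_boundary_crossings (y :: t) bs = bs.map (fun b => (bcCnt y t b : Int)) := by
  unfold count_boundary_crossings
  rw [PySem.List.slice_from_one]
  simp only [List.tail_cons, PySem.List.pyGetD_zero, List.getD_cons_zero, List.length_cons]
  rw [bc_foldA t y bs _ (by simp)]
  have := bc_zipWith_replicate (fun b => (bcCnt y t b : Int)) bs
  simpa using this

-- ---- bisect window ----

lemma bcH_le (vals : List Int) (hs : vals.Pairwise (· ≤ ·)) (p q : Int) :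
    bcH vals p q ≤ vals.length := by
  unfold bcH
  split_ifs
  · exact (PySem.List.bisectRight_spec vals q hs).1
  · exact (PySem.List.bisectLeft_spec vals p hs).1

lemma bcL_le_H (vals : List Int) (hs : vals.Pairwise (· ≤ ·)) (p q : Int) :
    bcL vals p q ≤ bcH vals p q := by
  unfold bcL bcH
  split_ifs with hpq
  · by_contra hlt
    push_neg at hlt
    have hspecp := PySem.List.bisectRight_spec vals p hs
    have hspecq := PySem.List.bisectRight_spec vals q hs
    have hjlen : PySem.List.bisectRight vals q < vals.length := lt_of_lt_of_le hlt hspecp.1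
    have h1 := hspecp.2.1 _ hjlen hlt
    have h2 := hspecq.2.2 _ hjlen (Nat.le_refl _)
    linarith
  · by_contra hlt
    push_neg at hlt
    push_neg at hpq
    have hspecp := PySem.List.bisectLeft_spec vals p hs
    have hspecq := PySem.List.bisectLeft_spec vals q hs
    have hjlen : PySem.List.bisectLeft vals p < vals.length := lt_of_lt_of_le hlt hspecq.1
    have h1 := hspecq.2.1 _ hjlen hlt
    have h2 := hspecp.2.2 _ hjlen (Nat.le_refl _)
    linarith

lemma bc_window (vals : List Int) (hs : vals.Pairwise (· ≤ ·)) (k : Nat) (hk : k < vals.length) (p q : Int) :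
    (bcL vals p q ≤ k ∧ k < bcH vals p q) ↔ bcCrossB p q vals[k] = true := by
  unfold bcL bcH
  by_cases hpq : p < q
  · have hsp := PySem.List.bisectRight_spec vals p hs
    have hsq := PySem.List.bisectRight_spec vals q hs
    simp only [if_pos hpq]
    constructor
    · rintro ⟨h1, h2⟩
      have hgt := hsp.2.2 k hk h1
      have hle := hsq.2.1 k hk h2
      simp only [bcCrossB, Bool.or_eq_true, Bool.and_eq_true, decide_eq_true_eq]
      exact Or.inl ⟨hgt, hle⟩
    · intro hc
      simp only [bcCrossB, Bool.or_eq_true, Bool.and_eq_true, decide_eq_true_eq] at hc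
      rcases hc with ⟨h1, h2⟩ | ⟨h1, h2⟩
      · constructor
        · by_contra hlt
          push_neg at hlt
          exact absurd (hsp.2.1 k hk hlt) (by linarith)
        · by_contra hge
          push_neg at hge
          exact absurd (hsq.2.2 k hk hge) (by linarith)
      · linarith
  · have hsp := PySem.List.bisectLeft_spec vals p hs
    have hsq := PySem.List.bisectLeft_spec vals q hs
    push_neg at hpq
    simp only [if_neg (by omega : ¬ p < q)]
    constructor
    · rintro ⟨h1, h2⟩
      have hge := hsq.2.2 k hk h1
      have hlt := hsp.2.1 k hk h2
      simp only [bcCrossB, Bool.or_eq_true, Bool.and_eq_true, decide_eq_true_eq]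
      exact Or.inr ⟨hlt, hge⟩
    · intro hc
      simp only [bcCrossB, Bool.or_eq_true, Bool.and_eq_true, decide_eq_true_eq] at hc
      rcases hc with ⟨h1, h2⟩ | ⟨h1, h2⟩
      · linarith
      · constructor
        · by_contra hlt
          push_neg at hlt
          exact absurd (hsq.2.1 k hk hlt) (by linarith)
        · by_contra hge
          push_neg at hge
          exact absurd (hsp.2.2 k hk hge) (by linarith)

-- ---- difference-array fold ----

lemma bc_take_succ_sum : ∀ (d : List Int) (j : Nat),
    (d.take (j+1)).sum = (d.take j).sum + d.getD j 0 := by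
  intro d
  induction d with
  | nil => intro j; simp
  | cons a d ih =>
    intro j
    cases j with
    | zero => simp
    | succ j => simp only [List.take_succ_cons, List.sum_cons, List.getD_cons_succ, ih j]; ring

lemma bc_take_sum_set : ∀ (d : List Int) (i : Nat) (v : Int) (n : Nat), i < d.length →
    ((d.set i v).take n).sum = (d.take n).sum + (if i < n then v - d.getD i 0 else 0) := by
  intro d
  induction d with
  | nil => intro i v n h; simp at h
  | cons a d ih =>
    intro i v n h
    cases i with
    | zero =>
      cases n with
      | zero => simp
      | succ n => simp; ring
    | succ i =>
      cases n with
      | zero => simp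
      | succ n =>
        simp at h
        simp only [List.set_cons_succ, List.take_succ_cons, List.sum_cons,
          List.getD_cons_succ, ih i v n h]
        have hiff : i + 1 < n + 1 ↔ i < n := by omega
        rw [if_congr hiff rfl rfl]
        split_ifs <;> ring

lemma bc_fold1 (vals : List Int) (hs : vals.Pairwise (· ≤ ·)) :
    ∀ (t : List Int) (p : Int) (d : List Int), d.length = vals.length + 1 → ∀ (n : Nat),
    (((t.foldl (bcStepDiff vals) (d, p)).1).take n).sum
      = (d.take n).sum
        + (List.countP (fun s => decide (bcL vals s.1 s.2 < n ∧ n ≤ bcH vals s.1 s.2)) (bcPairs p t) : Int) := by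
  intro t
  induction t with
  | nil => intro p d hd n; simp [bcPairs]
  | cons pos t ih =>
    intro p d hd n
    simp only [List.foldl_cons]
    have hLH := bcL_le_H vals hs p pos
    have hH := bcH_le vals hs p pos
    have hlo : bcL vals p pos < d.length := by omega
    have hhi : bcH vals p pos < d.length := by omega
    -- the step rewrites d into a double set
    have hstep : bcStepDiff vals (d, p) pos
        = ((d.set (bcL vals p pos) (d.getD (bcL vals p pos) 0 + 1)).set (bcH vals p pos)
            ((d.set (bcL vals p pos) (d.getD (bcL vals p pos) 0 + 1)).getD (bcH vals p pos) 0 - 1), pos) := by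
      unfold bcStepDiff bcL bcH
      split_ifs with hc <;>
        simp [PySem.List.pySetD_natCast, PySem.List.pyGetD_natCast]
    rw [hstep, ih pos _ (by simp [hd]) n]
    have h1 := bc_take_sum_set d (bcL vals p pos) (d.getD (bcL vals p pos) 0 + 1) n hlo
    have h2 := bc_take_sum_set (d.set (bcL vals p pos) (d.getD (bcL vals p pos) 0 + 1))
      (bcH vals p pos) ((d.set (bcL vals p pos) (d.getD (bcL vals p pos) 0 + 1)).getD (bcH vals p pos) 0 - 1) n
      (by simp [hlo, hhi])
    rw [h2, h1]
    have hcount : (List.countP (fun s => decide (bcL vals s.1 s.2 < n ∧ n ≤ bcH vals s.1 s.2))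
        (bcPairs p (pos :: t)) : Int)
        = (List.countP (fun s => decide (bcL vals s.1 s.2 < n ∧ n ≤ bcH vals s.1 s.2)) (bcPairs pos t) : Int)
          + (if bcL vals p pos < n ∧ n ≤ bcH vals p pos then 1 else 0) := by
      simp only [bcPairs, List.countP_cons, decide_eq_true_eq]
      split_ifs with hc <;> push_cast <;> ring
    rw [hcount]
    split_ifs with ha hb hb <;> push_cast <;> ring_nf <;> omega

-- ---- output fold ----

lemma bc_fold2 (diff order : List Int) (m : Nat)
    (hlen : order.length = m)
    (hmem : ∀ k, k < m → 0 ≤ order.getD k 0 ∧ order.getD k 0 < m)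
    (hinj : ∀ k1 k2, k1 < m → k2 < m → order.getD k1 0 = order.getD k2 0 → k1 = k2) :
    ∀ (j : Nat), j ≤ m →
    ((PySem.List.pyRange 0 (j : Int) 1).foldl (bcStepOut diff order) (List.replicate m (0 : Int), 0)).1.length = m
    ∧ ((PySem.List.pyRange 0 (j : Int) 1).foldl (bcStepOut diff order) (List.replicate m (0 : Int), 0)).2 = (diff.take j).sum
    ∧ ∀ k, k < j →
        ((PySem.List.pyRange 0 (j : Int) 1).foldl (bcStepOut diff order) (List.replicate m (0 : Int), 0)).1.getD
          (order.getD k 0).toNat 0 = (diff.take (k+1)).sum := by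
  intro j
  induction j with
  | zero =>
    intro _
    simp only [Nat.cast_zero, PySem.List.pyRange_one_eq_nil (le_refl (0 : Int))]
    exact ⟨by simp, by simp, fun k hk => absurd hk (by omega)⟩
  | succ j ih =>
    intro hj
    obtain ⟨hl, hr, he⟩ := ih (by omega)
    have hsplit : PySem.List.pyRange 0 ((j + 1 : Nat) : Int) 1
        = PySem.List.pyRange 0 (j : Int) 1 ++ [(j : Int)] := by
      push_cast
      exact PySem.List.pyRange_one_succ_right (by exact_mod_cast Nat.zero_le j)
    rw [hsplit, List.foldl_append, List.foldl_cons, List.foldl_nil]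
    have hjm : j < m := by omega
    have hoj := hmem j hjm
    have htn : (order.getD j 0).toNat < m := by omega
    have hidx : PySem.List.pyGetD order (j : Int) 0 = order.getD j 0 :=
      PySem.List.pyGetD_natCast _ _ _
    simp only [bcStepOut, hidx]
    set st := (PySem.List.pyRange 0 (j : Int) 1).foldl (bcStepOut diff order)
      (List.replicate m (0 : Int), 0) with hst
    have hrun : st.2 + PySem.List.pyGetD diff (j : Int) 0 = (diff.take (j+1)).sum := by
      rw [hr, PySem.List.pyGetD_natCast, bc_take_succ_sum]
    have hset : PySem.List.pySetD st.1 (order.getD j 0) (st.2 + PySem.List.pyGetD diff (j : Int) 0)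
        = st.1.set (order.getD j 0).toNat (st.2 + PySem.List.pyGetD diff (j : Int) 0) :=
      PySem.List.pySetD_of_nonneg _ _ hoj.1
    rw [hset]
    refine ⟨by simp [hl], hrun, ?_⟩
    intro k hk
    by_cases hkj : k = j
    · subst hkj
      rw [List.getD_eq_getElem _ _ (by simpa [hl] using htn), List.getElem_set_self]
      exact hrun
    · have hkj' : k < j := by omega
      have hkm := hmem k (by omega)
      have hne : (order.getD j 0).toNat ≠ (order.getD k 0).toNat := by
        intro hEq
        have heq2 : order.getD k 0 = order.getD j 0 := by omega
        exact hkj (hinj k j (by omega) hjm heq2)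
      have hkl : (order.getD k 0).toNat < st.1.length := by omega
      rw [List.getD_eq_getElem _ _ (by simpa using hkl), List.getElem_set_ne hne]
      rw [← List.getD_eq_getElem _ 0 hkl]
      exact he k hkj'

lemma bc_B_char (y : Int) (t bs : List Int) :
    count_boundary_crossings_alt (y :: t) bs = bs.map (fun b => (bcCnt y t b : Int)) := by
  set m := bs.length with hm
  set key : Int → Int := fun i => PySem.List.pyGetD bs i 0 with hkey
  set order := PySem.List.sorted (PySem.List.pyRange 0 (m : Int) 1) key with horderdef
  set vals := order.map key with hvals
  have horder_len : order.length = m := by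
    rw [horderdef, PySem.List.length_sorted, PySem.List.length_pyRange_one]
    simp
  have hvals_len : vals.length = m := by simp [hvals, horder_len]
  have hsorted : vals.Pairwise (· ≤ ·) := by
    rw [hvals, horderdef]
    exact PySem.List.sorted_map_key_pairwise _ _
  have hmem_order : ∀ x ∈ order, 0 ≤ x ∧ x < (m : Int) := by
    intro x hx
    rw [horderdef, PySem.List.mem_sorted] at hx
    simpa using PySem.List.mem_pyRange_one.mp hx
  have hnodup : order.Nodup := by
    refine (List.Perm.nodup_iff (PySem.List.sorted_perm _ _ _)).mpr ?_
    exact PySem.List.nodup_pyRange_one 0 (m : Int)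
  have hmemD : ∀ k, k < m → 0 ≤ order.getD k 0 ∧ order.getD k 0 < (m : Int) := by
    intro k hk
    have hkl : k < order.length := by omega
    rw [List.getD_eq_getElem _ _ hkl]
    exact hmem_order _ (List.getElem_mem hkl)
  have hinjD : ∀ k1 k2, k1 < m → k2 < m → order.getD k1 0 = order.getD k2 0 → k1 = k2 := by
    intro k1 k2 h1 h2 heq
    have h1l : k1 < order.length := by omega
    have h2l : k2 < order.length := by omega
    rw [List.getD_eq_getElem _ _ h1l, List.getD_eq_getElem _ _ h2l] at heq
    exact (hnodup.getElem_inj_iff).mp heq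
  set diff := ((PySem.List.slice (y :: t) (some 1) none).foldl (bcStepDiff vals)
      (List.replicate (m+1) (0 : Int), PySem.List.pyGetD (y :: t) 0 0)).1 with hdiffdef
  have hdtake : ∀ n : Nat, (diff.take n).sum
      = (List.countP (fun s => decide (bcL vals s.1 s.2 < n ∧ n ≤ bcH vals s.1 s.2)) (bcPairs y t) : Int) := by
    intro n
    rw [hdiffdef, PySem.List.slice_from_one, List.tail_cons, PySem.List.pyGetD_zero,
      List.getD_cons_zero, bc_fold1 vals hsorted t y _ (by simp [hvals_len]) n]
    simp
  have halt : count_boundary_crossings_alt (y :: t) bs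
      = ((PySem.List.pyRange 0 (m : Int) 1).foldl (bcStepOut diff order)
          (List.replicate m (0 : Int), 0)).1 := rfl
  obtain ⟨hflen, -, hfe⟩ := bc_fold2 diff order m horder_len hmemD hinjD m (le_refl m)
  rw [halt]
  apply List.ext_getElem
  · simp only [List.length_map]; exact hflen
  intro j hj1 hj2
  have hjm : j < m := by rwa [hflen] at hj1
  have hjmem : (j : Int) ∈ order := by
    rw [horderdef, PySem.List.mem_sorted, PySem.List.mem_pyRange_one]
    exact ⟨by positivity, by exact_mod_cast hjm⟩
  obtain ⟨k, hk, hOk⟩ := List.mem_iff_getElem.mp hjmem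
  have hkm : k < m := by omega
  have hgetDk : order.getD k 0 = (j : Int) := by rw [List.getD_eq_getElem _ _ hk, hOk]
  have hidx : (order.getD k 0).toNat = j := by rw [hgetDk]; simp
  have hentry := hfe k hkm
  rw [hidx, List.getD_eq_getElem _ _ hj1] at hentry
  rw [hentry, List.getElem_map]
  have hkv : k < vals.length := by omega
  have hvk : vals[k] = bs[j]'(by omega) := by
    simp only [hvals, List.getElem_map]
    rw [hOk, hkey]
    simp only []
    rw [PySem.List.pyGetD_natCast, List.getD_eq_getElem _ _ (by omega : j < bs.length)]
  rw [hdtake (k+1)]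
  have hcong : List.countP (fun s => decide (bcL vals s.1 s.2 < k + 1 ∧ k + 1 ≤ bcH vals s.1 s.2)) (bcPairs y t)
      = List.countP (fun s => bcCrossB s.1 s.2 (bs[j]'(by omega))) (bcPairs y t) := by
    apply List.countP_congr
    intro x _
    rw [decide_eq_true_eq, ← hvk]
    have := bc_window vals hsorted k hkv x.1 x.2
    constructor
    · intro h
      exact this.mp ⟨by omega, by omega⟩
    · intro h
      have h2 := this.mpr h
      omega
  rw [hcong]
  rfl

-- ===== VERDICT (by name: the statement is the Claim_ definition above) =====
theorem count_boundary_crossings_spec : Claim_equal_count_boundary_crossings := by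
  unfold Claim_equal_count_boundary_crossings
  intro ys bs _ hpre
  unfold Spec_count_boundary_crossings
  cases ys with
  | nil => exact absurd rfl hpre
  | cons y t => rw [bc_A_char, bc_B_char]
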